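-- pv_equiv track=rewrite | github.com/Eakz/HR_CW | CodeWars/python/6kyu_hackerman.py | hackermann
-- ===== SOURCE A (Python) =====
-- def hackermann(m, n, f):
--     s = [m]
--     while s:
--         m = s.pop()
--         if m <= 0:
--             n += f
--             continue
--         s.append(m-f)
--         if n <= 0:
--             n = 1
--             continue
--         s.append(m)
--         n -= f
--     return n
-- ===== SOURCE B (Python) =====
-- def hackermann(m, n, f):
--     if m <= 0:
--         return n + f
--     if n <= 0:
--         return hackermann(m - f, 1, f)
--     r = hackermann(m - f, 1, f)
--     for _ in range((n + f - 1) // f):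
--         r = hackermann(m - f, r, f)
--     return r
-- ===== Notes on version B (the rewrite author's own statement) =====
-- stated objective: alternative
-- what changed: A simulates the generalized-Ackermann recursion with an explicit stack and a while loop; B uses direct recursion on m with the n-dimension flattened into a counted bottom-up loop whose iteration count is computed by ceiling division, so no stack is maintained.
import Mathlib
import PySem

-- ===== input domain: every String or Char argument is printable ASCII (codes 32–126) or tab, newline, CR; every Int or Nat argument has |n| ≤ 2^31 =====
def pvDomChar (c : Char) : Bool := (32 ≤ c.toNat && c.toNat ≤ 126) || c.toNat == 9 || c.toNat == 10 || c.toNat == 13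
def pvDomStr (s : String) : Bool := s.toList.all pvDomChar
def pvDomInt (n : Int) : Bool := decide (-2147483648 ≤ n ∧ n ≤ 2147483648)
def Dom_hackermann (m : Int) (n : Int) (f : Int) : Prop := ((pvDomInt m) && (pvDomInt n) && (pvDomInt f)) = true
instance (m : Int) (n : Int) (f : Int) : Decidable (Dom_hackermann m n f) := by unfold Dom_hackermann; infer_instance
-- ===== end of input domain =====

-- B replaces A's explicit stack simulation by direct recursion on m with a counted
-- bottom-up loop over n (iteration count by ceiling division); same values, different
-- decomposition (objective: alternative).

-- ===== PORT A =====
-- Literal port of A's while-loop over the stack `s` (head of the list = top of the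
-- Python stack, i.e. the element `s.pop()` takes) and accumulator `n`, with a fuel
-- counter as a totality guard: `none` means the loop has not finished within `k`
-- iterations.
def hackLoop : Nat → List Int → Int → Int → Option Int
  | _, [], n, _ => some n
  | 0, _ :: _, _, _ => none
  | (k+1), m :: s, n, f =>
      if m ≤ 0 then hackLoop k s (n + f) f
      else if n ≤ 0 then hackLoop k ((m - f) :: s) 1 f
      else hackLoop k (m :: (m - f) :: s) (n - f) f

-- one unfolding step of the loop (definitional)
theorem hackLoop_succ_cons (k : Nat) (m : Int) (s : List Int) (n f : Int) :
    hackLoop (k+1) (m :: s) n f =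
      if m ≤ 0 then hackLoop k s (n + f) f
      else if n ≤ 0 then hackLoop k ((m - f) :: s) 1 f
      else hackLoop k (m :: (m - f) :: s) (n - f) f := rfl

-- fuel monotonicity (needed by the port's termination witness below)
theorem hackLoop_mono (f : Int) : ∀ (k : Nat) (s : List Int) (n r : Int),
    hackLoop k s n f = some r → hackLoop (k+1) s n f = some r := by
  intro k
  induction k with
  | zero =>
    intro s n r h
    cases s with
    | nil => simpa [hackLoop] using h
    | cons m s => simp [hackLoop] at h
  | succ k ih =>
    intro s n r h
    cases s with
    | nil => simpa [hackLoop] using h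
    | cons m s =>
      rw [hackLoop_succ_cons] at h ⊢
      by_cases h1 : m ≤ 0
      · rw [if_pos h1] at h ⊢
        exact ih _ _ _ h
      · rw [if_neg h1] at h ⊢
        by_cases h2 : n ≤ 0
        · rw [if_pos h2] at h ⊢
          exact ih _ _ _ h
        · rw [if_neg h2] at h ⊢
          exact ih _ _ _ h

theorem hackLoop_mono_le (f : Int) (k k' : Nat) (hk : k ≤ k') (s : List Int) (n r : Int)
    (h : hackLoop k s n f = some r) : hackLoop k' s n f = some r := by
  induction k' with
  | zero =>
    have hk0 : k = 0 := by omega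
    rw [← hk0]; exact h
  | succ k' ih =>
    by_cases hkk : k = k' + 1
    · rw [← hkk]; exact h
    · exact hackLoop_mono f k' s n r (ih (by omega))

-- running two stacks in sequence (needed by the port's termination witness below)
theorem hackLoop_append (f : Int) : ∀ (k : Nat) (s : List Int) (n r : Int),
    hackLoop k s n f = some r → ∀ (k' : Nat) (t : List Int) (r' : Int),
    hackLoop k' t r f = some r' → hackLoop (k + k') (s ++ t) n f = some r' := by
  intro k
  induction k with
  | zero =>
    intro s n r h k' t r' h'
    cases s with
    | nil =>
      simp only [hackLoop, Option.some_inj] at h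
      subst h
      simpa using hackLoop_mono_le f k' (0 + k') (by omega) t n r' h'
    | cons m s => simp [hackLoop] at h
  | succ k ih =>
    intro s n r h k' t r' h'
    cases s with
    | nil =>
      simp only [hackLoop, Option.some_inj] at h
      subst h
      simpa using hackLoop_mono_le f k' (k + 1 + k') (by omega) t n r' h'
    | cons m s =>
      have hstep : k + 1 + k' = (k + k') + 1 := by omega
      rw [hstep]
      rw [hackLoop_succ_cons] at h
      simp only [List.cons_append]
      rw [hackLoop_succ_cons]
      by_cases h1 : m ≤ 0
      · rw [if_pos h1] at h ⊢
        exact ih _ _ _ h _ _ _ h'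
      · rw [if_neg h1] at h ⊢
        by_cases h2 : n ≤ 0
        · rw [if_pos h2] at h ⊢
          simpa using ih _ _ _ h _ _ _ h'
        · rw [if_neg h2] at h ⊢
          simpa using ih _ _ _ h _ _ _ h'

-- A's loop terminates on a singleton stack whenever f ≥ 1 (cited by the port below)
theorem hackLoop_term (f : Int) (hf : 1 ≤ f) (m n : Int) :
    ∃ k r, hackLoop k [m] n f = some r := by
  by_cases hm : m ≤ 0
  · exact ⟨1, n + f, by simp [hackLoop, hm]⟩
  · by_cases hn : n ≤ 0
    · obtain ⟨k, r, hk⟩ := hackLoop_term f hf (m - f) 1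
      refine ⟨k + 1, r, ?_⟩
      rw [hackLoop_succ_cons, if_neg hm, if_pos hn]
      exact hk
    · obtain ⟨k1, r1, hk1⟩ := hackLoop_term f hf m (n - f)
      obtain ⟨k2, r2, hk2⟩ := hackLoop_term f hf (m - f) r1
      refine ⟨(k1 + k2) + 1, r2, ?_⟩
      rw [hackLoop_succ_cons, if_neg hm, if_neg hn]
      have := hackLoop_append f k1 [m] (n - f) r1 hk1 k2 [m - f] r2 hk2
      simpa using this
termination_by (m.toNat, n.toNat)
decreasing_by
  · exact Prod.Lex.left _ _ (by omega)
  · exact Prod.Lex.right _ (by omega)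
  · exact Prod.Lex.left _ _ (by omega)

theorem hackLoop_term_pre (m n f : Int) (h : m ≤ 0 ∨ 1 ≤ f) :
    ∃ k, (hackLoop (2 ^ k) [m] n f).isSome := by
  rcases h with hm | hf
  · exact ⟨1, by simp [hackLoop, hm]⟩
  · obtain ⟨k, r, hk⟩ := hackLoop_term f hf m n
    exact ⟨k, by simp [hackLoop_mono_le f k (2 ^ k) (Nat.le_of_lt Nat.lt_two_pow_self) [m] n r hk]⟩

-- the port: run A's loop on the initial stack [m]; the dite and the search for a
-- sufficient amount of fuel are the totality guard (outside it A's Python loop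
-- never terminates)
def hackermann (m : Int) (n : Int) (f : Int) : Int :=
  if h : m ≤ 0 ∨ 1 ≤ f then
    (hackLoop (2 ^ Nat.find (hackLoop_term_pre m n f h)) [m] n f).getD 0
  else 0

-- ===== PORT B =====
-- Port of Source B.  The branch `f ≤ 0` is a totality guard only (outside Pre_, where
-- the Python recursion does not terminate); every recursive call lowers m by f ≥ 1.
def hackermann_alt (m : Int) (n : Int) (f : Int) : Int :=
  if _hm : m ≤ 0 then n + f
  else if _hf : f ≤ 0 then 0
  else if _hn : n ≤ 0 then hackermann_alt (m - f) 1 f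
  else
    (List.range (PySem.Int.floordiv (n + f - 1) f).toNat).foldl
      (fun r _ => hackermann_alt (m - f) r f)
      (hackermann_alt (m - f) 1 f)
termination_by m.toNat
decreasing_by all_goals omega

-- ===== PRECONDITION & SPEC =====
-- Pre_ excludes exactly the inputs (m > 0 with f ≤ 0) on which A's loop never
-- terminates (Python A diverges, returning nothing).
def Pre_hackermann (m : Int) (n : Int) (f : Int) : Prop := m ≤ 0 ∨ 1 ≤ f
instance (m : Int) (n : Int) (f : Int) : Decidable (Pre_hackermann m n f) := by unfold Pre_hackermann; infer_instance
def pvWitness_hackermann : Int × Int × Int := (2, 3, 1)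

def Spec_hackermann (m : Int) (n : Int) (f : Int) (out : Int) : Prop := out = hackermann_alt m n f
instance (m : Int) (n : Int) (f : Int) (out : Int) : Decidable (Spec_hackermann m n f out) := by unfold Spec_hackermann; infer_instance

-- ===== CLAIM (what is proved, stated in full; the proofs are below) =====
def Claim_equal_hackermann : Prop := ∀ (m : Int) (n : Int) (f : Int), Dom_hackermann m n f → Pre_hackermann m n f → Spec_hackermann m n f (hackermann m n f)

-- ===== LEMMAS AND PROOFS =====

-- determinism across fuels
theorem hackLoop_det (f : Int) (k k' : Nat) (s : List Int) (n r r' : Int)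
    (h : hackLoop k s n f = some r) (h' : hackLoop k' s n f = some r') : r = r' := by
  have h1 := hackLoop_mono_le f k (k + k') (by omega) s n r h
  have h2 := hackLoop_mono_le f k' (k + k') (by omega) s n r' h'
  rw [h1] at h2
  exact Option.some_inj.mp h2

-- the recurrence satisfied by hackermann_alt in its main region
theorem alt_base (m n f : Int) (hm : m ≤ 0) : hackermann_alt m n f = n + f := by
  rw [hackermann_alt]; simp [hm]

theorem alt_npos (m n f : Int) (hm : 0 < m) (hf : 1 ≤ f) (hn : n ≤ 0) :
    hackermann_alt m n f = hackermann_alt (m - f) 1 f := by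
  rw [hackermann_alt]
  simp [show ¬ m ≤ 0 by omega, show ¬ f ≤ 0 by omega, hn]

theorem alt_rec (m n f : Int) (hm : 0 < m) (hf : 1 ≤ f) (hn : 0 < n) :
    hackermann_alt m n f = hackermann_alt (m - f) (hackermann_alt m (n - f) f) f := by
  have hfpos : (0:Int) < f := by omega
  have hunf : ∀ n' : Int, 0 < n' → hackermann_alt m n' f =
      (List.range ((n' + f - 1) / f).toNat).foldl
        (fun r _ => hackermann_alt (m - f) r f) (hackermann_alt (m - f) 1 f) := by
    intro n' hn'
    rw [hackermann_alt]
    simp [show ¬ m ≤ 0 by omega, show ¬ f ≤ 0 by omega, show ¬ n' ≤ 0 by omega,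
      PySem.Int.floordiv_eq_ediv_of_pos hfpos]
  by_cases hnf : 0 < n - f
  · -- one more iteration than at n - f
    have hsteps : ((n + f - 1) / f).toNat = ((n - f + f - 1) / f).toNat + 1 := by
      have h1 : (n + f - 1) / f = (n - f + f - 1) / f + 1 := by
        have hrw : n + f - 1 = (n - f + f - 1) + 1 * f := by ring
        rw [hrw, Int.add_mul_ediv_right _ _ (by omega : f ≠ 0)]
      have h2 : (0:Int) ≤ (n - f + f - 1) / f := Int.ediv_nonneg (by omega) (by omega)
      omega
    rw [hunf n hn, hunf (n - f) hnf, hsteps, List.range_succ, List.foldl_append]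
    simp
  · -- base: 0 < n ≤ f, exactly one iteration
    have hsteps : ((n + f - 1) / f).toNat = 1 := by
      have hlo : (1:Int) ≤ (n + f - 1) / f :=
        (Int.le_ediv_iff_mul_le hfpos).mpr (by omega)
      have hhi : (n + f - 1) / f < 2 :=
        (Int.ediv_lt_iff_lt_mul hfpos).mpr (by omega)
      omega
    rw [hunf n hn, hsteps]
    simp [alt_npos m (n - f) f hm hf (by omega)]

-- the stack machine, started with a single entry, computes hackermann_alt
theorem hackLoop_run (f : Int) (hf : 1 ≤ f) (m n : Int) :
    ∃ k, hackLoop k [m] n f = some (hackermann_alt m n f) := by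
  by_cases hm : m ≤ 0
  · exact ⟨1, by simp [hackLoop, hm, alt_base m n f hm]⟩
  · by_cases hn : n ≤ 0
    · obtain ⟨k, hk⟩ := hackLoop_run f hf (m - f) 1
      refine ⟨k + 1, ?_⟩
      rw [hackLoop_succ_cons, if_neg hm, if_pos hn]
      rw [alt_npos m n f (by omega) hf hn]
      exact hk
    · obtain ⟨k1, hk1⟩ := hackLoop_run f hf m (n - f)
      obtain ⟨k2, hk2⟩ := hackLoop_run f hf (m - f) (hackermann_alt m (n - f) f)
      refine ⟨(k1 + k2) + 1, ?_⟩
      rw [hackLoop_succ_cons, if_neg hm, if_neg hn]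
      have := hackLoop_append f k1 [m] (n - f) (hackermann_alt m (n - f) f) hk1
        k2 [m - f] (hackermann_alt (m - f) (hackermann_alt m (n - f) f) f) hk2
      rw [alt_rec m n f (by omega) hf (by omega)]
      simpa using this
termination_by (m.toNat, n.toNat)
decreasing_by
  · exact Prod.Lex.left _ _ (by omega)
  · exact Prod.Lex.right _ (by omega)
  · exact Prod.Lex.left _ _ (by omega)

-- ===== VERDICT (by name: the statement is the Claim_ definition above) =====
theorem hackermann_spec : Claim_equal_hackermann := by
  intro m n f _ hpre
  unfold Spec_hackermann hackermann
  have hpre' : m ≤ 0 ∨ 1 ≤ f := hpre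
  rw [dif_pos hpre']
  have hrun : ∃ k, hackLoop k [m] n f = some (hackermann_alt m n f) := by
    rcases hpre' with hm | hf
    · exact ⟨1, by simp [hackLoop, hm, alt_base m n f hm]⟩
    · exact hackLoop_run f hf m n
  obtain ⟨k0, hk0⟩ := hrun
  have hfind := Nat.find_spec (hackLoop_term_pre m n f hpre')
  obtain ⟨r, hr⟩ := Option.isSome_iff_exists.mp hfind
  rw [hr]
  simpa using hackLoop_det f (2 ^ Nat.find (hackLoop_term_pre m n f hpre')) k0 [m] n r
    (hackermann_alt m n f) hr hk0
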